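-- pv_equiv track=rewrite | github.com/bioimagehub/run_pipeline | standard_code/python/split_bioformats.py | translate_template_to_bfconvert
-- ===== SOURCE A (Python) =====
-- def translate_template_to_bfconvert(template: str | None) -> str:
--     """
--     Translate brace-based template tokens to bfconvert percent tokens.
--
--     Supported tokens:
--     - {s}: series
--     - {c}: channel
--     - {z}: Z plane
--     - {t}: timepoint
--
--     This avoids `%` in YAML and is converted here.
--     """
--     if not template:
--         return ""
--     t = template
--     # Accept uppercase variants too
--     replacements = {
--         "{s}": "%s", "{S}": "%s",
--         "{c}": "%c", "{C}": "%c",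
--         "{z}": "%z", "{Z}": "%z",
--         "{t}": "%t", "{T}": "%t",
--     }
--     for k, v in replacements.items():
--         t = t.replace(k, v)
--     return t
-- ===== SOURCE B (Python) =====
-- def translate_template_to_bfconvert(template: str | None) -> str:
--     """Single left-to-right window scan instead of eight sequential full-string replaces."""
--     if not template:
--         return ""
--     out = []
--     i = 0
--     n = len(template)
--     while i < n:
--         if i + 2 < n and template[i] == '{' and template[i + 2] == '}' and template[i + 1] in "sScCzZtT":
--             out.append('%')
--             out.append(template[i + 1].lower())
--             i += 3
--         else:
--             out.append(template[i])
--             i += 1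
--     return ''.join(out)
-- ===== Notes on version B (the rewrite author's own statement) =====
-- stated objective: alternative
-- what changed: Replaced eight sequential full-string str.replace passes with a single left-to-right window scan that matches each brace token once and emits the corresponding percent token directly.
import Mathlib
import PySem

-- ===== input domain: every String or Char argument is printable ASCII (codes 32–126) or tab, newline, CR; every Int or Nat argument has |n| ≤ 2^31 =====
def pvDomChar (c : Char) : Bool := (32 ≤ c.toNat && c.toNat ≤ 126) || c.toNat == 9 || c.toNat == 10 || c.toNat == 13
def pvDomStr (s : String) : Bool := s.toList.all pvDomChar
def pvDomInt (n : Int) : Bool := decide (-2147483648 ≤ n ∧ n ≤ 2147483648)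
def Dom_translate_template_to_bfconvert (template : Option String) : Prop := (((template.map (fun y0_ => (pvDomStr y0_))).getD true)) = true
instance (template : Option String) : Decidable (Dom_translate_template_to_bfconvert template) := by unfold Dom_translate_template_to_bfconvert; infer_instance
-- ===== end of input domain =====

-- B replaces A's eight sequential full-string str.replace passes by ONE left-to-right
-- window scan over the template (objective: alternative — a single pass instead of eight).

-- ===== PORT A =====
-- A's `replacements` dict, as the insertion-ordered list of its items
def pvReplPairs : List (String × String) :=
  [("{s}", "%s"), ("{S}", "%s"), ("{c}", "%c"), ("{C}", "%c"),
   ("{z}", "%z"), ("{Z}", "%z"), ("{t}", "%t"), ("{T}", "%t")]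

def translate_template_to_bfconvert (template : Option String) : String :=
  match template with
  | none => ""          -- `if not template: return ""`
  | some s =>
      if s.toList = [] then ""
      else pvReplPairs.foldl (fun t kv => PySem.Str.replace t kv.1 kv.2) s

-- ===== PORT B =====
-- Source B's while-loop: at each position, a 3-char window `{X}` with X in `toks`
-- emits '%' X.lower() and skips 3 chars; otherwise the current char is copied
def pvScan (toks : List Char) : List Char → List Char
  | c1 :: c2 :: c3 :: rest =>
      if c1 = '{' ∧ c3 = '}' ∧ c2 ∈ toks then
        '%' :: PySem.Chars.lowerChar c2 :: pvScan toks rest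
      else c1 :: pvScan toks (c2 :: c3 :: rest)
  | l => l


def pvTokens : List Char := ['s', 'S', 'c', 'C', 'z', 'Z', 't', 'T']

def translate_template_to_bfconvert_alt (template : Option String) : String :=
  match template with
  | none => ""          -- `if not template: return ""`
  | some s =>
      if s.toList = [] then ""
      else String.ofList (pvScan pvTokens s.toList)

-- ===== PRECONDITION & SPEC =====
def Spec_translate_template_to_bfconvert (template : Option String) (out : String) : Prop := out = translate_template_to_bfconvert_alt template
instance (template : Option String) (out : String) : Decidable (Spec_translate_template_to_bfconvert template out) := by unfold Spec_translate_template_to_bfconvert; infer_instance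

-- ===== CLAIM (what is proved, stated in full; the proofs are below) =====
def Claim_equal_translate_template_to_bfconvert : Prop := ∀ (template : Option String), Dom_translate_template_to_bfconvert template → Spec_translate_template_to_bfconvert template (translate_template_to_bfconvert template)

-- ===== LEMMAS AND PROOFS =====

theorem pvScan_cons_ne (toks : List Char) (c : Char) (l : List Char) (h : c ≠ '{') :
    pvScan toks (c :: l) = c :: pvScan toks l := by
  match l with
  | [] => rfl
  | [b] => rfl
  | b :: d :: r => simp [pvScan, h]

theorem pvReplaceGo_eq (x : Char) :
    ∀ (fuel : Nat) (l acc : List Char), l.length ≤ fuel →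
      PySem.Chars.replace.go ['{', x, '}'] ['%', PySem.Chars.lowerChar x] fuel l acc =
        acc.reverse ++ pvScan [x] l := by
  intro fuel
  induction fuel with
  | zero =>
      intro l acc h
      have : l = [] := List.eq_nil_of_length_eq_zero (Nat.le_zero.mp h)
      subst this; rw [PySem.Chars.replace.go]; simp [pvScan]
  | succ m ih =>
      intro l acc h
      match l with
      | [] => rw [PySem.Chars.replace.go]; simp [pvScan]; omega
      | [c] =>
          rw [PySem.Chars.replace.go, if_neg (by simp [List.isPrefixOf]),
            ih [] (c :: acc) (by simp)]
          simp [pvScan]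
      | [c, d] =>
          rw [PySem.Chars.replace.go, if_neg (by simp [List.isPrefixOf]),
            ih [d] (c :: acc) (by simp at h ⊢; omega)]
          simp [pvScan]
      | c :: d :: e :: t =>
          rw [PySem.Chars.replace.go]
          by_cases hp : c = '{' ∧ d = x ∧ e = '}'
          · obtain ⟨h1, h2, h3⟩ := hp
            subst h1; subst h2; subst h3
            rw [if_pos (by simp [List.isPrefixOf])]
            simp only [List.length_cons, List.length_nil, List.drop_succ_cons, List.drop_zero]
            rw [ih t _ (by simp at h ⊢; omega)]
            simp [pvScan]
          · rw [if_neg (by simp [List.isPrefixOf]; intro h1 h2 h3; exact hp ⟨h1.symm, h2.symm, h3.symm⟩)]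
            rw [ih (d :: e :: t) (c :: acc) (by simp at h ⊢; omega)]
            have hcond : ¬(c = '{' ∧ e = '}' ∧ d ∈ [x]) := by
              simp only [List.mem_singleton]
              intro ⟨h1, h3, h2⟩; exact hp ⟨h1, h2, h3⟩
            have hsc : pvScan [x] (c :: d :: e :: t) = c :: pvScan [x] (d :: e :: t) := by
              simp only [pvScan]; rw [if_neg hcond]
            rw [hsc]; simp

theorem pvScan_pos (toks : List Char) (c1 c2 c3 : Char) (rest : List Char)
    (h : c1 = '{' ∧ c3 = '}' ∧ c2 ∈ toks) :
    pvScan toks (c1 :: c2 :: c3 :: rest) = '%' :: PySem.Chars.lowerChar c2 :: pvScan toks rest := by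
  simp only [pvScan]; rw [if_pos h]

theorem pvScan_neg (toks : List Char) (c1 c2 c3 : Char) (rest : List Char)
    (h : ¬(c1 = '{' ∧ c3 = '}' ∧ c2 ∈ toks)) :
    pvScan toks (c1 :: c2 :: c3 :: rest) = c1 :: pvScan toks (c2 :: c3 :: rest) := by
  simp only [pvScan]; rw [if_neg h]

theorem pvScan_head (toks : List Char) (a : Char) (l : List Char) :
    (pvScan toks (a :: l)).head? = some a ∨ (pvScan toks (a :: l)).head? = some '%' := by
  match l with
  | [] => left; rfl
  | [b] => left; rfl
  | b :: d :: r =>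
      by_cases hm : a = '{' ∧ d = '}' ∧ b ∈ toks
      · right; rw [pvScan_pos toks a b d r hm]; rfl
      · left; rw [pvScan_neg toks a b d r hm]; rfl

theorem pvScan_compose (x : Char) (toks : List Char) (hx1 : x ≠ '{') (hx2 : x ≠ '%')
    (ht : ∀ c ∈ toks, PySem.Chars.lowerChar c ≠ '{') :
    ∀ cs, pvScan [x] (pvScan toks cs) = pvScan (toks ++ [x]) cs := by
  suffices key : ∀ (n : Nat) (cs : List Char), cs.length ≤ n →
      pvScan [x] (pvScan toks cs) = pvScan (toks ++ [x]) cs by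
    intro cs; exact key cs.length cs le_rfl
  intro n
  induction n with
  | zero =>
      intro cs h
      have : cs = [] := List.eq_nil_of_length_eq_zero (Nat.le_zero.mp h)
      subst this; rfl
  | succ m ih =>
      intro cs h
      match cs with
      | [] => rfl
      | [a] => rfl
      | [a, b] => rfl
      | a :: b :: c :: t =>
          have hlt : t.length ≤ m := by simp at h; omega
          have hlt2 : (b :: c :: t).length ≤ m := by simp at h ⊢; omega
          by_cases hm : a = '{' ∧ c = '}' ∧ b ∈ toks
          · rw [pvScan_pos toks a b c t hm,
              pvScan_pos (toks ++ [x]) a b c t ⟨hm.1, hm.2.1, List.mem_append_left _ hm.2.2⟩,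
              pvScan_cons_ne [x] '%' _ (by decide),
              pvScan_cons_ne [x] (PySem.Chars.lowerChar b) _ (ht b hm.2.2), ih t hlt]
          · by_cases hx : a = '{' ∧ c = '}' ∧ b = x
            · obtain ⟨ha, hc, hb⟩ := hx
              rw [pvScan_neg toks a b c t hm,
                pvScan_cons_ne toks b (c :: t) (by rw [hb]; exact hx1),
                pvScan_cons_ne toks c t (by rw [hc]; decide),
                pvScan_pos [x] a b c (pvScan toks t)
                  ⟨ha, hc, by rw [hb]; exact List.mem_singleton.mpr rfl⟩,
                pvScan_pos (toks ++ [x]) a b c t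
                  ⟨ha, hc, by rw [hb]; exact List.mem_append_right _ (List.mem_singleton.mpr rfl)⟩,
                ih t hlt]
            · -- no token matches at the head on either side
              have hm2 : ¬(a = '{' ∧ c = '}' ∧ b ∈ toks ++ [x]) := by
                intro ⟨ha, hc, hb⟩
                rcases List.mem_append.mp hb with hb1 | hb2
                · exact hm ⟨ha, hc, hb1⟩
                · exact hx ⟨ha, hc, List.mem_singleton.mp hb2⟩
              rw [pvScan_neg toks a b c t hm, pvScan_neg (toks ++ [x]) a b c t hm2,
                ← ih (b :: c :: t) hlt2]
              -- the x-scan copies `a` through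
              by_cases hA : a = '{'
              · subst hA
                match hw : pvScan toks (b :: c :: t) with
                | [] => rfl
                | [w1] => rfl
                | w1 :: w2 :: wr =>
                    refine pvScan_neg [x] '{' w1 w2 wr ?_
                    rintro ⟨-, hw2, hw1⟩
                    rw [List.mem_singleton] at hw1
                    by_cases hbx : b = x
                    · have hcne : c ≠ '}' := fun hce => hx ⟨rfl, hce, hbx⟩
                      rw [pvScan_cons_ne _ _ _ (by rw [hbx]; exact hx1)] at hw
                      injection hw with hw1' hwr
                      rcases pvScan_head toks c t with hh | hh <;> rw [hwr] at hh <;>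
                        simp at hh
                      · exact hcne (by rw [← hh, hw2])
                      · rw [hw2] at hh; exact absurd hh (by decide)
                    · rcases pvScan_head toks b (c :: t) with hh | hh <;> rw [hw] at hh <;>
                        simp at hh
                      · exact hbx (by rw [← hh, hw1])
                      · rw [hw1] at hh; exact hx2 hh
              · rw [pvScan_cons_ne _ _ _ hA]


-- one str.replace of "{x}" by '%' ++ lower x is the single-token scan
theorem pvReplace_eq (t : String) (x : Char) (o n : String)
    (ho : o.toList = ['{', x, '}']) (hn : n.toList = ['%', PySem.Chars.lowerChar x]) :
    (PySem.Str.replace t o n).toList = pvScan [x] t.toList := by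
  rw [PySem.Str.toList_replace, ho, hn, PySem.Chars.replace]
  rw [if_neg (by simp)]
  exact pvReplaceGo_eq x t.toList.length t.toList [] le_rfl

-- ===== VERDICT (by name: the statement is the Claim_ definition above) =====
set_option maxRecDepth 8192 in
theorem translate_template_to_bfconvert_spec : Claim_equal_translate_template_to_bfconvert := by
  intro template _
  unfold Spec_translate_template_to_bfconvert
  unfold translate_template_to_bfconvert translate_template_to_bfconvert_alt
  cases template with
  | none => rfl
  | some s =>
      by_cases hs : s.toList = []
      · simp [hs]
      · simp only [if_neg hs]
        apply String.toList_inj.mp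
        simp only [pvReplPairs, List.foldl_cons, List.foldl_nil]
        rw [pvReplace_eq _ 'T' _ _ (by decide) (by decide),
          pvReplace_eq _ 't' _ _ (by decide) (by decide),
          pvReplace_eq _ 'Z' _ _ (by decide) (by decide),
          pvReplace_eq _ 'z' _ _ (by decide) (by decide),
          pvReplace_eq _ 'C' _ _ (by decide) (by decide),
          pvReplace_eq _ 'c' _ _ (by decide) (by decide),
          pvReplace_eq _ 'S' _ _ (by decide) (by decide),
          pvReplace_eq _ 's' _ _ (by decide) (by decide)]
        rw [pvScan_compose 'S' ['s'] (by decide) (by decide) (by intro c hc; fin_cases hc <;> decide)]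
        simp only [List.cons_append, List.nil_append]
        rw [pvScan_compose 'c' ['s', 'S'] (by decide) (by decide) (by intro c hc; fin_cases hc <;> decide)]
        simp only [List.cons_append, List.nil_append]
        rw [pvScan_compose 'C' ['s', 'S', 'c'] (by decide) (by decide) (by intro c hc; fin_cases hc <;> decide)]
        simp only [List.cons_append, List.nil_append]
        rw [pvScan_compose 'z' ['s', 'S', 'c', 'C'] (by decide) (by decide) (by intro c hc; fin_cases hc <;> decide)]
        simp only [List.cons_append, List.nil_append]
        rw [pvScan_compose 'Z' ['s', 'S', 'c', 'C', 'z'] (by decide) (by decide) (by intro c hc; fin_cases hc <;> decide)]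
        simp only [List.cons_append, List.nil_append]
        rw [pvScan_compose 't' ['s', 'S', 'c', 'C', 'z', 'Z'] (by decide) (by decide) (by intro c hc; fin_cases hc <;> decide)]
        simp only [List.cons_append, List.nil_append]
        rw [pvScan_compose 'T' ['s', 'S', 'c', 'C', 'z', 'Z', 't'] (by decide) (by decide) (by intro c hc; fin_cases hc <;> decide)]
        simp only [List.cons_append, List.nil_append]
        rw [String.toList_ofList]
        rfl
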